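-- pv_equiv track=rewrite | github.com/lucasgarciabertaina/hackerrank-python3 | basicDataTypes/nestedList.py | secondLowest
-- ===== SOURCE A (Python) =====
-- def secondLowest(array):
--     scores = [array[student][1] for student in range(len(array))]
--     secLowest = list(dict.fromkeys(sorted(scores)))[1]
--     position = [score for score in range(
--         len(scores)) if scores[score] == secLowest]
--     people = sorted([array[name][0] for name in position])
--     resolt = ''
--     for i in range(len(people)):
--         if i != len(people)-1:
--             resolt += people[i]+'\n'
--         else:
--             resolt += people[i]
--     return resolt
-- ===== SOURCE B (Python) =====
-- def secondLowest(array):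
--     scores = [row[1] for row in array]
--     lowest = min(scores)
--     second = min(s for s in scores if s != lowest)
--     names = sorted(row[0] for row in array if row[1] == second)
--     return '\n'.join(names)
-- ===== Notes on version B (the rewrite author's own statement) =====
-- stated objective: simpler
-- what changed: Replaces A's sort-then-dedup-then-index-1, index-position filter, and manual last-element '\n' loop by two min passes (lowest score, then lowest score differing from it), a direct row filter, and '\n'.join.
import Mathlib
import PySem

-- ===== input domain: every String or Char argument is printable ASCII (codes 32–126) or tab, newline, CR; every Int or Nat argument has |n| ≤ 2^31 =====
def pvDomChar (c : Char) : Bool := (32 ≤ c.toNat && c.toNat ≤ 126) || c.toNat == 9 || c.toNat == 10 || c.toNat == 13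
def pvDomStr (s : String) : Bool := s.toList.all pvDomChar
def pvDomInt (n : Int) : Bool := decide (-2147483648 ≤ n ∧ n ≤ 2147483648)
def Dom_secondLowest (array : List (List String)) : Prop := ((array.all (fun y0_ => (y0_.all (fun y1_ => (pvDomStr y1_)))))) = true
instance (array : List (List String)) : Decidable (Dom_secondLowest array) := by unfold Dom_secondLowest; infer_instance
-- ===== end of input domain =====

-- B replaces A's sort→dedup→index-1→index-filter→manual '\n' loop by two mins (the lowest
-- score, then the lowest score different from it) and a direct filter + join; objective: simpler.

-- ===== PORT A =====
def secondLowest (array : List (List String)) : String :=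
  let scores := (PySem.List.pyRange 0 (PySem.List.len array)).map
      (fun student => PySem.List.pyGetD (PySem.List.pyGetD array student []) 1 "")
  let secLowest := (PySem.List.pyGet? (PySem.List.dedup (PySem.List.sorted scores id)) 1).getD ""
  let position := (PySem.List.pyRange 0 (PySem.List.len scores)).filter
      (fun score => PySem.List.pyGetD scores score "" == secLowest)
  let people := PySem.List.sorted (position.map
      (fun name => PySem.List.pyGetD (PySem.List.pyGetD array name []) 0 "")) id
  (PySem.List.pyRange 0 (PySem.List.len people)).foldl
      (fun resolt i =>
        if i ≠ PySem.List.len people - 1 then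
          resolt ++ PySem.List.pyGetD people i "" ++ "\n"
        else
          resolt ++ PySem.List.pyGetD people i "") ""

-- ===== PORT B =====
def secondLowest_alt (array : List (List String)) : String :=
  let scores := array.map (fun row => PySem.List.pyGetD row 1 "")
  let lowest := (PySem.List.min? scores id).getD ""
  let second := (PySem.List.min? (scores.filter (fun s => s != lowest)) id).getD ""
  let names := PySem.List.sorted
      ((array.filter (fun row => PySem.List.pyGetD row 1 "" == second)).map
        (fun row => PySem.List.pyGetD row 0 "")) id
  PySem.Str.join "\n" names

-- ===== PRECONDITION & SPEC =====
-- Pre_ excludes exactly the inputs where the Python A raises IndexError: a row with fewer than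
-- 2 entries (on array[student][1]) or fewer than 2 distinct scores (on the [1] after dedup).
def Pre_secondLowest (array : List (List String)) : Prop :=
  (∀ row ∈ array, 2 ≤ row.length) ∧
  2 ≤ (PySem.List.dedup (array.map (fun row => PySem.List.pyGetD row 1 ""))).length
instance (array : List (List String)) : Decidable (Pre_secondLowest array) := by
  unfold Pre_secondLowest; infer_instance
def pvWitness_secondLowest : List (List String) := [["alice", "10"], ["bob", "9"]]
def Spec_secondLowest (array : List (List String)) (out : String) : Prop := out = secondLowest_alt array
instance (array : List (List String)) (out : String) : Decidable (Spec_secondLowest array out) := by unfold Spec_secondLowest; infer_instance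

-- ===== CLAIM (what is proved, stated in full; the proofs are below) =====
def Claim_equal_secondLowest : Prop := ∀ (array : List (List String)), Dom_secondLowest array → Pre_secondLowest array → Spec_secondLowest array (secondLowest array)

-- ===== LEMMAS AND PROOFS =====

-- A's comprehension over range(len(xs)) indexing xs is a map over xs.
theorem pv_map_idx {α β : Type} (xs : List α) (d : α) (h : α → β) :
    (PySem.List.pyRange 0 (PySem.List.len xs)).map (fun i => h (PySem.List.pyGetD xs i d))
      = xs.map h := by
  have : (fun i => h (PySem.List.pyGetD xs i d))
      = h ∘ (fun i => PySem.List.pyGetD xs i d) := rfl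
  rw [this, ← List.map_map, PySem.List.map_pyGetD_pyRange_zero]

-- Filtering index positions and then mapping the indexed element is filter-then-map (Nat form).
theorem pv_filter_map_idx_nat {α β : Type} (l : List α) (p : α → Bool) (g : α → β) (d : α) :
    ((List.range l.length).filter (fun k => p (l.getD k d))).map (fun k => g (l.getD k d))
      = (l.filter p).map g := by
  induction l with
  | nil => simp
  | cons x l ih =>
    rw [List.length_cons, List.range_succ_eq_map]
    have hsucc : ∀ (q : Nat → Bool) (r : List Nat), (r.map Nat.succ).filter q = (r.filter (fun k => q (k+1))).map Nat.succ :=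
      fun q r => by rw [List.filter_map]; rfl
    rw [List.filter_cons, hsucc]
    by_cases hp : p x = true
    · rw [if_pos (by simpa using hp)]
      simp only [List.map_cons, List.map_map, Function.comp_def, Nat.succ_eq_add_one,
        List.getD_cons_succ, List.getD_cons_zero, ih, List.filter_cons_of_pos hp, List.map_cons]
    · rw [if_neg (by simpa using hp)]
      simp only [List.map_map, Function.comp_def, Nat.succ_eq_add_one,
        List.getD_cons_succ, ih, List.filter_cons_of_neg (by simpa using hp)]

-- The same, in A's pyRange/pyGetD clothing.
theorem pv_filter_map_idx {α β : Type} (l : List α) (p : α → Bool) (g : α → β) (d : α) :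
    ((PySem.List.pyRange 0 (PySem.List.len l)).filter (fun i => p (PySem.List.pyGetD l i d))).map
        (fun i => g (PySem.List.pyGetD l i d))
      = (l.filter p).map g := by
  have hlen : PySem.List.len l = ((l.length : Nat) : Int) := rfl
  rw [hlen, PySem.List.pyRange_zero_natCast, List.filter_map, List.map_map]
  have h1 : ((fun i => g (PySem.List.pyGetD l i d)) ∘ fun (k : Nat) => (k : Int))
      = fun k => g (l.getD k d) := by
    funext k; simp [PySem.List.pyGetD_natCast]
  have h2 : ((fun i => p (PySem.List.pyGetD l i d)) ∘ fun (k : Nat) => (k : Int))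
      = fun k => p (l.getD k d) := by
    funext k; simp [PySem.List.pyGetD_natCast]
  rw [h1, h2, pv_filter_map_idx_nat]

-- dict.fromkeys keeps a subsequence of its argument.
theorem pv_dedup_sublist {α : Type} [BEq α] [LawfulBEq α] (xs : List α) :
    (PySem.List.dedup xs).Sublist xs := by
  rw [PySem.List.dedup_eq_ofList]
  induction xs using List.reverseRecOn with
  | nil => simp [PySem.Set.ofList_nil]
  | append_singleton ys y ih =>
    rw [PySem.Set.ofList_append_singleton, PySem.Set.add]
    split
    · exact ih.trans (List.sublist_append_left ys [y])
    · exact List.Sublist.append ih (List.Sublist.refl [y])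

-- The second element of the deduplicated sorted scores is the least score above the least score.
theorem pv_second (scores : List String)
    (h2 : 2 ≤ (PySem.List.dedup scores).length) :
    (PySem.List.pyGet? (PySem.List.dedup (PySem.List.sorted scores id)) 1).getD ""
      = (PySem.List.min? (scores.filter
          (fun s => s != (PySem.List.min? scores id).getD "")) id).getD "" := by
  have hmem : ∀ a : String, a ∈ PySem.List.dedup (PySem.List.sorted scores id) ↔ a ∈ scores := by
    intro a; rw [PySem.List.mem_dedup, PySem.List.mem_sorted]
  have hnd : (PySem.List.dedup (PySem.List.sorted scores id)).Nodup := PySem.List.nodup_dedup _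
  have hperm : (PySem.List.dedup scores).Perm (PySem.List.dedup (PySem.List.sorted scores id)) :=
    (List.perm_ext_iff_of_nodup (PySem.List.nodup_dedup _) hnd).2
      (by intro a; rw [PySem.List.mem_dedup, hmem])
  have hlenS : 2 ≤ (PySem.List.dedup (PySem.List.sorted scores id)).length := by
    rw [← hperm.length_eq]; exact h2
  have hpw : (PySem.List.dedup (PySem.List.sorted scores id)).Pairwise (fun a b : String => a < b) := by
    have hle : (PySem.List.sorted scores id).Pairwise (fun a b : String => id a ≤ id b) :=
      PySem.List.sorted_pairwise scores id
    have hleS := List.Pairwise.sublist (pv_dedup_sublist _) hle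
    exact (hleS.and hnd).imp (fun h => lt_of_le_of_ne h.1 h.2)
  rcases hSs : PySem.List.dedup (PySem.List.sorted scores id) with _ | ⟨s0, _ | ⟨s1, t⟩⟩
  · rw [hSs] at hlenS; simp at hlenS
  · rw [hSs] at hlenS; simp at hlenS
  · rw [hSs] at hmem hnd hpw
    have hs0s1 : s0 < s1 := (List.pairwise_cons.1 hpw).1 s1 (by simp)
    have hs0t : ∀ a ∈ t, s0 < a := fun a ha => (List.pairwise_cons.1 hpw).1 a (by simp [ha])
    have hs1t : ∀ a ∈ t, s1 < a := fun a ha =>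
      (List.pairwise_cons.1 (List.pairwise_cons.1 hpw).2).1 a ha
    have hs0mem : s0 ∈ scores := (hmem s0).1 (by simp)
    have hs1mem : s1 ∈ scores := (hmem s1).1 (by simp)
    -- the overall minimum is s0
    cases hm : PySem.List.min? scores id with
    | none =>
      rw [PySem.List.min?_eq_none_iff] at hm
      rw [hm] at hs0mem; simp at hs0mem
    | some m =>
      have hmm : m ∈ scores := PySem.List.min?_mem hm
      have hmmin := PySem.List.min?_isMin hm
      have hms0 : m = s0 := by
        have h1 : m ≤ s0 := hmmin s0 hs0mem
        have h2' : s0 ≤ m := by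
          have : m ∈ s0 :: s1 :: t := (hmem m).2 hmm
          rcases this with _ | ⟨_, h⟩
          · exact le_refl _
          · rcases h with _ | ⟨_, h⟩
            · exact le_of_lt hs0s1
            · exact le_of_lt (hs0t _ h)
        exact le_antisymm h1 h2'
      -- the minimum of the scores different from s0 is s1
      have hs1F : s1 ∈ scores.filter (fun s => s != (some m).getD "") := by
        simp only [Option.getD_some, List.mem_filter, bne_iff_ne]
        exact ⟨hs1mem, by rw [hms0]; exact ne_of_gt hs0s1⟩
      cases hm2 : PySem.List.min? (scores.filter (fun s => s != (some m).getD "")) id with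
      | none =>
        rw [PySem.List.min?_eq_none_iff] at hm2
        rw [hm2] at hs1F; simp at hs1F
      | some m2 =>
        have hm2F := PySem.List.min?_mem hm2
        have hm2min := PySem.List.min?_isMin hm2
        have hm2s : m2 ∈ scores ∧ m2 ≠ s0 := by
          have := List.mem_filter.1 hm2F
          refine ⟨this.1, ?_⟩
          have hb := this.2
          simp only [Option.getD_some, bne_iff_ne] at hb
          rw [hms0] at hb; exact hb
        have hm2eq : m2 = s1 := by
          have h1 : m2 ≤ s1 := hm2min s1 hs1F
          have h2' : s1 ≤ m2 := by
            have : m2 ∈ s0 :: s1 :: t := (hmem m2).2 hm2s.1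
            rcases this with _ | ⟨_, h⟩
            · exact absurd rfl hm2s.2
            · rcases h with _ | ⟨_, h⟩
              · exact le_refl _
              · exact le_of_lt (hs1t _ h)
          exact le_antisymm h1 h2'
        have : PySem.List.pyGet? (s0 :: s1 :: t) 1 = some s1 := by
          simp [PySem.List.pyGet?, PySem.List.pyIdx?]
        rw [this, hm2eq]

-- A's index loop with the trailing-'\n' special case is '\n'.join (Nat form, general accumulator).
theorem pv_join_nat (l : List String) : ∀ (acc : String),
    (List.range l.length).foldl
        (fun r k => if ((k : Nat) : Int) ≠ ((l.length : Nat) : Int) - 1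
          then r ++ l.getD k "" ++ "\n" else r ++ l.getD k "") acc
      = acc ++ PySem.Str.join "\n" l := by
  induction l with
  | nil =>
    intro acc
    rw [← String.toList_inj]
    simp [PySem.Str.toList_join, PySem.Chars.join_nil, String.toList_append]
  | cons x l ih =>
    intro acc
    rw [List.length_cons, List.range_succ_eq_map, List.foldl_cons, List.foldl_map]
    have hfun : (fun (r : String) (k : Nat) =>
          if ((Nat.succ k : Nat) : Int) ≠ (((l.length + 1 : Nat) : Nat) : Int) - 1
            then r ++ (x :: l).getD (Nat.succ k) "" ++ "\n" else r ++ (x :: l).getD (Nat.succ k) "")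
        = (fun r k => if ((k : Nat) : Int) ≠ ((l.length : Nat) : Int) - 1
            then r ++ l.getD k "" ++ "\n" else r ++ l.getD k "") := by
      funext r k
      have hc : (((Nat.succ k : Nat) : Int) ≠ (((l.length + 1 : Nat) : Nat) : Int) - 1)
          ↔ (((k : Nat) : Int) ≠ ((l.length : Nat) : Int) - 1) := by
        push_cast
        constructor <;> (intro h h'; apply h; omega)
      rw [List.getD_cons_succ, if_congr hc rfl rfl]
    rw [hfun, ih]
    cases l with
    | nil =>
      rw [if_neg (by simp)]
      rw [← String.toList_inj]
      simp [PySem.Str.toList_join, PySem.Chars.join_singleton, PySem.Chars.join_nil,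
        String.toList_append]
    | cons y l' =>
      rw [if_pos (by simp only [List.length_cons]; push_cast; omega), List.getD_cons_zero]
      rw [← String.toList_inj]
      simp only [PySem.Str.toList_join, String.toList_append, List.map_cons,
        PySem.Chars.join_cons_cons]
      simp

-- The same, in A's pyRange/pyGetD clothing.
theorem pv_join (l : List String) :
    (PySem.List.pyRange 0 (PySem.List.len l)).foldl
        (fun r i => if i ≠ PySem.List.len l - 1
          then r ++ PySem.List.pyGetD l i "" ++ "\n" else r ++ PySem.List.pyGetD l i "") ""
      = PySem.Str.join "\n" l := by
  have hlen : PySem.List.len l = ((l.length : Nat) : Int) := rfl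
  rw [hlen, PySem.List.pyRange_zero_natCast, List.foldl_map]
  have hfun : (fun (r : String) (k : Nat) =>
        if ((k : Nat) : Int) ≠ ((l.length : Nat) : Int) - 1
          then r ++ PySem.List.pyGetD l (k : Int) "" ++ "\n" else r ++ PySem.List.pyGetD l (k : Int) "")
      = (fun r k => if ((k : Nat) : Int) ≠ ((l.length : Nat) : Int) - 1
          then r ++ l.getD k "" ++ "\n" else r ++ l.getD k "") := by
    funext r k; rw [PySem.List.pyGetD_natCast]
  rw [hfun, pv_join_nat l ""]
  rw [← String.toList_inj]
  simp

-- A's scores[i] is row i's score (pyGetD over the mapped list; defeq default [] ↦ "").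
theorem pv_scores_idx (array : List (List String)) (i : Int) :
    PySem.List.pyGetD (array.map (fun row => PySem.List.pyGetD row 1 "")) i ""
      = PySem.List.pyGetD (PySem.List.pyGetD array i []) 1 "" :=
  PySem.List.pyGetD_map (fun row => PySem.List.pyGetD row 1 "") array i []

theorem pv_len_map {α β : Type} (f : α → β) (xs : List α) :
    PySem.List.len (xs.map f) = PySem.List.len xs := by
  simp [PySem.List.len]

-- ===== VERDICT (by name: the statement is the Claim_ definition above) =====
theorem secondLowest_spec : Claim_equal_secondLowest := by
  intro array _hdom hpre
  show secondLowest array = secondLowest_alt array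
  obtain ⟨-, h2⟩ := hpre
  simp only [secondLowest, secondLowest_alt]
  rw [pv_map_idx array ([] : List String) (fun row => PySem.List.pyGetD row 1 "")]
  rw [pv_second _ h2]
  simp only [pv_scores_idx, pv_len_map]
  rw [pv_filter_map_idx array
      (fun row => PySem.List.pyGetD row 1 "" ==
        (PySem.List.min? ((array.map (fun row => PySem.List.pyGetD row 1 "")).filter
          (fun s => s != (PySem.List.min? (array.map (fun row => PySem.List.pyGetD row 1 "")) id).getD "")) id).getD "")
      (fun row => PySem.List.pyGetD row 0 "") ([] : List String)]
  rw [pv_join]
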